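-- pv_equiv track=rewrite | github.com/giacomobais/TagInsert | models/Variant1/scripts/preprocess.py | get_positional_mapping
-- ===== SOURCE A (Python) =====
-- def get_positional_mapping(MAX_DEPTH):
--     """ Get the unique identifiers for each node in the tree, assuming the root is at depth 0; the tree is a full binary tree and the given MAX_DEPTH. """
--     positions = ['0']
--     for depth in range(1, MAX_DEPTH+1):
--         length = depth
--         # binary string of length `length` with all possible comninations
--         for i in range(2 ** length):
--             positions.append(f'{i:0{length}b}')
--
--     # replace 0s with -1
--     positions = [p.replace('0', '-1') for p in positions]
--     positions[0] = '0'
--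
--     # copy positions list to another list
--     slashes = positions.copy()
--     all_encodings = [f'{p}{s}' for p in positions[1:] for s in slashes[1:]]
--     all_encodings = ['00'] + all_encodings
--
--     enc_to_idx = {}
--     for i, enc in enumerate(sorted(list(set(all_encodings)))):
--         enc_to_idx[enc] = i
--
--     return enc_to_idx
-- ===== SOURCE B (Python) =====
-- def get_positional_mapping(MAX_DEPTH):
--     """ Get the unique identifiers for each node in the tree, assuming the root is at depth 0; the tree is a full binary tree and the given MAX_DEPTH. """
--     # DFS over the full binary tree: each non-root node is named by its path,
--     # '-1' for a left step and '1' for a right step.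
--     def dfs(path, depth):
--         if depth >= MAX_DEPTH:
--             return []
--         left = path + '-1'
--         right = path + '1'
--         return [left] + dfs(left, depth + 1) + [right] + dfs(right, depth + 1)
--
--     nodes = dfs('', 0)
--     encodings = ['00'] + [p + s for p in nodes for s in nodes]
--     return {enc: i for i, enc in enumerate(sorted(set(encodings)))}
-- ===== Notes on version B (the rewrite author's own statement) =====
-- stated objective: alternative
-- what changed: The node-name generation is replaced: instead of formatting every integer 0..2**d-1 as a zero-padded binary string per depth and then string-replacing '0' with '-1', B builds the names by a recursive DFS over the binary tree, appending '-1'/'1' path tokens; the pairwise-concatenation, '00' sentinel, set, sort and enumerate tail is unchanged.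
import Mathlib
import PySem

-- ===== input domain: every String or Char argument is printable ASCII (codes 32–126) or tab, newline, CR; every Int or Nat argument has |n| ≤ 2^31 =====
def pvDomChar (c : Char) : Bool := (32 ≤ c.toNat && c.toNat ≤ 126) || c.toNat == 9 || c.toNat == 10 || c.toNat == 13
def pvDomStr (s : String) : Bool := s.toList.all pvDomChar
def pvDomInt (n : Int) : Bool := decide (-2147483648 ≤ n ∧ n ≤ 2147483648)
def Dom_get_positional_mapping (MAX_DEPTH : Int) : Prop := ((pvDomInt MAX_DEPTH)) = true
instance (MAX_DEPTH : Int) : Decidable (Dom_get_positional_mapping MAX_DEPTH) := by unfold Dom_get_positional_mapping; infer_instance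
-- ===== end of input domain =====

-- B replaces A's integer-format-then-replace enumeration of node names by a recursive DFS over the
-- binary tree (objective: alternative); the pairwise-concatenation / set / sort / enumerate tail is shared.


-- ===== PORT A =====
-- strings are handled as List Char (PySem.Chars) and packed with String.mk where the Python builds
-- the f-string values; f'{i:0{length}b}' (i ≥ 0, length ≥ 1 here) is zfill of format(i,'b'),
-- i.e. PySem.Chars.zfill (PySem.Int.toBinChars i) length; 2 ** length is 2 ^ length.toNat (length ≥ 1).
def get_positional_mapping (MAX_DEPTH : Int) : List (String × Int) :=
  -- positions = ['0']; for depth in range(1, MAX_DEPTH+1): for i in range(2**length): append f'{i:0{length}b}'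
  let positions0 : List (List Char) :=
    (PySem.List.pyRange 1 (MAX_DEPTH + 1) 1).foldl (fun acc depth =>
      (PySem.List.pyRange 0 (2 ^ depth.toNat) 1).foldl (fun acc2 i =>
        acc2 ++ [PySem.Chars.zfill (PySem.Int.toBinChars i) depth]) acc) [['0']]
  -- positions = [p.replace('0', '-1') for p in positions]
  let positions1 := positions0.map (fun p => PySem.Chars.replace p ['0'] ['-', '1'])
  -- positions[0] = '0'
  let positions := PySem.List.pySetD positions1 0 ['0']
  -- slashes = positions.copy()
  let slashes := positions
  -- all_encodings = ['00'] + [f'{p}{s}' for p in positions[1:] for s in slashes[1:]]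
  let all_encodings : List String :=
    "00" :: (PySem.List.slice positions (some 1) none).flatMap (fun p =>
      (PySem.List.slice slashes (some 1) none).map (fun s => String.mk (p ++ s)))
  -- for i, enc in enumerate(sorted(list(set(all_encodings)))): enc_to_idx[enc] = i
  let sortedL := PySem.List.sorted (PySem.Set.ofList all_encodings) (fun x => x) false
  (sortedL.zipIdx.foldl (fun d p => d.insert p.1 ((p.2 : Int))) PySem.Dict.empty).items

-- ===== PORT B =====
-- dfs(path, depth) of Source B; the recursion is on the remaining depth MAX_DEPTH - depth,
-- so 'rem' here is (MAX_DEPTH - depth).toNat (rem = 0 ↔ depth >= MAX_DEPTH, the Python base case).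
def pvDfsB (path : List Char) (rem : Nat) : List (List Char) :=
  match rem with
  | 0 => []
  | r + 1 =>
    let left := path ++ ['-', '1']
    let right := path ++ ['1']
    left :: (pvDfsB left r ++ right :: pvDfsB right r)

def get_positional_mapping_alt (MAX_DEPTH : Int) : List (String × Int) :=
  -- nodes = dfs('', 0)
  let nodes := pvDfsB [] MAX_DEPTH.toNat
  -- encodings = ['00'] + [p + s for p in nodes for s in nodes]
  let encodings : List String :=
    "00" :: nodes.flatMap (fun p => nodes.map (fun s => String.mk (p ++ s)))
  -- {enc: i for i, enc in enumerate(sorted(set(encodings)))}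
  let sortedL := PySem.List.sorted (PySem.Set.ofList encodings) (fun x => x) false
  (sortedL.zipIdx.foldl (fun d p => d.insert p.1 ((p.2 : Int))) PySem.Dict.empty).items

-- ===== PRECONDITION & SPEC =====
def Spec_get_positional_mapping (MAX_DEPTH : Int) (out : List (String × Int)) : Prop := out = get_positional_mapping_alt MAX_DEPTH
instance (MAX_DEPTH : Int) (out : List (String × Int)) : Decidable (Spec_get_positional_mapping MAX_DEPTH out) := by unfold Spec_get_positional_mapping; infer_instance

-- ===== CLAIM (what is proved, stated in full; the proofs are below) =====
def Claim_equal_get_positional_mapping : Prop := ∀ (MAX_DEPTH : Int), Dom_get_positional_mapping MAX_DEPTH → Spec_get_positional_mapping MAX_DEPTH (get_positional_mapping MAX_DEPTH)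

-- ===== LEMMAS AND PROOFS =====

-- the single-character substitution performed by .replace('0', '-1')
def pvSubst (c : Char) : List Char := if c = '0' then ['-', '1'] else [c]

-- the level-by-level name lists: pvLvl s n = names of the depth-n descendants of the node named s,
-- in left-to-right order
def pvLvl (s : List Char) : Nat → List (List Char)
  | 0 => [s]
  | n + 1 => (pvLvl s n).flatMap (fun t => [t ++ ['-', '1'], t ++ ['1']])

-- .replace('0','-1') is the character-wise substitution pvSubst
theorem pvReplaceGo_eq (fuel : Nat) : ∀ (l acc : List Char), l.length ≤ fuel →
    PySem.Chars.replace.go ['0'] ['-', '1'] fuel l acc = acc.reverse ++ l.flatMap pvSubst := by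
  induction fuel with
  | zero =>
    intro l acc h
    have : l = [] := by cases l <;> simp_all
    subst this; simp [PySem.Chars.replace.go]
  | succ f ih =>
    intro l acc h
    cases l with
    | nil => simp [PySem.Chars.replace.go]
    | cons c t =>
      by_cases hc : c = '0'
      · subst hc
        have hpre : List.isPrefixOf ['0'] ('0' :: t) = true := by simp [List.isPrefixOf]
        simp only [PySem.Chars.replace.go, hpre, if_pos]
        rw [ih _ _ (by simpa using h)]
        simp [pvSubst]
      · have hpre : List.isPrefixOf ['0'] (c :: t) = false := by
          simp [List.isPrefixOf]
          exact fun h => hc h.symm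
        simp only [PySem.Chars.replace.go, hpre]
        rw [if_neg (by simp [hc]), ih _ _ (by simpa using h)]
        simp [pvSubst, hc]

theorem pvReplace_eq (s : List Char) :
    PySem.Chars.replace s ['0'] ['-', '1'] = s.flatMap pvSubst := by
  have : PySem.Chars.replace s ['0'] ['-', '1']
      = PySem.Chars.replace.go ['0'] ['-', '1'] s.length s [] := by
    simp [PySem.Chars.replace]
  rw [this, pvReplaceGo_eq s.length s [] le_rfl]
  simp

-- Nat.toDigits facts ------------------------------------------------------

theorem pvToDigitsCore_append (f : Nat) : ∀ (n : Nat) (l : List Char),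
    Nat.toDigitsCore 2 f n l = Nat.toDigitsCore 2 f n [] ++ l := by
  induction f with
  | zero => intro n l; simp [Nat.toDigitsCore]
  | succ f ih =>
    intro n l
    by_cases h : n / 2 = 0
    · simp [Nat.toDigitsCore, h]
    · simp only [Nat.toDigitsCore, h, if_neg, if_false]
      rw [ih (n / 2) (Nat.digitChar (n % 2) :: l), ih (n / 2) [Nat.digitChar (n % 2)]]
      simp

theorem pvToDigitsCore_fuel (n : Nat) : ∀ (f₁ f₂ : Nat) (l : List Char), n < f₁ → n < f₂ →
    Nat.toDigitsCore 2 f₁ n l = Nat.toDigitsCore 2 f₂ n l := by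
  induction n using Nat.strong_induction_on with
  | _ n ih =>
    intro f₁ f₂ l h₁ h₂
    obtain ⟨g₁, rfl⟩ : ∃ g, f₁ = g + 1 := ⟨f₁ - 1, by omega⟩
    obtain ⟨g₂, rfl⟩ : ∃ g, f₂ = g + 1 := ⟨f₂ - 1, by omega⟩
    by_cases h : n / 2 = 0
    · simp [Nat.toDigitsCore, h]
    · simp only [Nat.toDigitsCore, h, if_neg, if_false]
      exact ih (n / 2) (by omega) g₁ g₂ _ (by omega) (by omega)

theorem pvToDigits_step (k b : Nat) (hk : 1 ≤ k) (hb : b < 2) :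
    Nat.toDigits 2 (2 * k + b) = Nat.toDigits 2 k ++ [Nat.digitChar b] := by
  have hdiv : (2 * k + b) / 2 = k := by omega
  have hmod : (2 * k + b) % 2 = b := by omega
  have hne : ¬ (2 * k + b) / 2 = 0 := by omega
  have h1 : Nat.toDigitsCore 2 (2 * k + b + 1) (2 * k + b) []
      = Nat.toDigitsCore 2 (2 * k + b) k [Nat.digitChar b] := by
    rw [Nat.toDigitsCore, if_neg hne, hdiv, hmod]
  show Nat.toDigitsCore 2 (2 * k + b + 1) (2 * k + b) [] = _
  rw [h1, pvToDigitsCore_append (2 * k + b) k [Nat.digitChar b],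
    pvToDigitsCore_fuel k (2 * k + b) (k + 1) [] (by omega) (by omega)]
  rfl

theorem pvToDigitsCore_chars (f : Nat) : ∀ (n : Nat) (l : List Char),
    (∀ c ∈ l, c = '0' ∨ c = '1') → ∀ c ∈ Nat.toDigitsCore 2 f n l, c = '0' ∨ c = '1' := by
  induction f with
  | zero => intro n l hl; simpa [Nat.toDigitsCore] using hl
  | succ f ih =>
    intro n l hl
    have hd : Nat.digitChar (n % 2) = '0' ∨ Nat.digitChar (n % 2) = '1' := by
      have : n % 2 = 0 ∨ n % 2 = 1 := by omega
      rcases this with h | h <;> simp [h, Nat.digitChar]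
    by_cases h : n / 2 = 0
    · simp only [Nat.toDigitsCore, h, if_pos]
      intro c hc
      rcases List.mem_cons.mp hc with rfl | hc
      · exact hd
      · exact hl c hc
    · simp only [Nat.toDigitsCore, h, if_neg, if_false]
      exact ih (n / 2) _ (by
        intro c hc
        rcases List.mem_cons.mp hc with rfl | hc
        · exact hd
        · exact hl c hc)

theorem pvToDigits_chars (n : Nat) : ∀ c ∈ Nat.toDigits 2 n, c = '0' ∨ c = '1' :=
  pvToDigitsCore_chars (n + 1) n [] (by simp)

theorem pvToDigits_ne_nil (n : Nat) : Nat.toDigits 2 n ≠ [] := by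
  show Nat.toDigitsCore 2 (n + 1) n [] ≠ []
  by_cases h : n / 2 = 0
  · simp [Nat.toDigitsCore, h]
  · simp only [Nat.toDigitsCore, h, if_neg, if_false]
    rw [pvToDigitsCore_append]
    simp

theorem pvToBinChars_natCast (m : Nat) :
    PySem.Int.toBinChars (m : Int) = Nat.toDigits 2 m := by
  simp [PySem.Int.toBinChars]

-- zfill facts --------------------------------------------------------------

theorem pvZfill_append (cs : List Char) (d : Char) (n : Nat)
    (hne : cs ≠ []) (hch : ∀ c ∈ cs, c = '0' ∨ c = '1') :
    PySem.Chars.zfill (cs ++ [d]) ((n : Int) + 1) = PySem.Chars.zfill cs (n : Int) ++ [d] := by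
  obtain ⟨c, rest, rfl⟩ : ∃ c rest, cs = c :: rest := by
    cases cs with
    | nil => exact absurd rfl hne
    | cons c r => exact ⟨c, r, rfl⟩
  have hc : ¬ (c = '+' ∨ c = '-') := by
    rcases hch c (by simp) with h | h <;> subst h <;> decide
  simp only [PySem.Chars.zfill, List.cons_append, if_neg hc]
  by_cases hlen : (n : Int) ≤ ((c :: rest) : List Char).length
  · have h2 : ((n : Int) + 1) ≤ ((c :: (rest ++ [d])) : List Char).length := by
      simp only [List.length_cons, List.length_append, List.length_nil] at hlen ⊢
      omega
    simp only [if_pos h2, if_pos hlen]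
    rfl
  · have h2 : ¬ ((n : Int) + 1) ≤ ((c :: (rest ++ [d])) : List Char).length := by
      simp only [List.length_cons, List.length_append, List.length_nil] at hlen ⊢
      omega
    simp only [if_neg h2, if_neg hlen]
    have harith : ((n : Int) + 1).toNat - (c :: (rest ++ [d])).length
        = (n : Int).toNat - (c :: rest).length := by
      simp only [List.length_cons, List.length_append, List.length_nil]
      omega
    rw [harith]
    simp

theorem pvZfill_singleton (c : Char) (hc : ¬ (c = '+' ∨ c = '-')) (m : Nat) (hm : 1 ≤ m) :
    PySem.Chars.zfill [c] (m : Int) = List.replicate (m - 1) '0' ++ [c] := by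
  by_cases h : (m : Int) ≤ ([c] : List Char).length
  · have hm1 : m = 1 := by simp only [List.length_cons, List.length_nil] at h; omega
    subst hm1
    rw [PySem.Chars.zfill, if_pos h]
    simp
  · rw [PySem.Chars.zfill, if_neg h]
    simp [hc]

-- range splitting ----------------------------------------------------------

theorem pvRange_two_mul (m : Nat) :
    List.range (2 * m) = (List.range m).flatMap (fun k => [2 * k, 2 * k + 1]) := by
  induction m with
  | zero => simp
  | succ m ih =>
    have : 2 * (m + 1) = 2 * m + 1 + 1 := by omega
    rw [this, List.range_succ, List.range_succ, List.range_succ, ih]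
    simp [List.flatMap_append]

-- the A-side per-depth list is pvLvl ---------------------------------------

-- W k n = the name the Python A builds for the k-th node at depth n (after .replace)
def pvW (k n : Nat) : List Char :=
  (PySem.Chars.zfill (PySem.Int.toBinChars (k : Int)) (n : Int)).flatMap pvSubst

theorem pvW_step (k n : Nat) (hn : 1 ≤ n) (b : Nat) (hb : b < 2) :
    pvW (2 * k + b) (n + 1) = pvW k n ++ (if b = 0 then ['-', '1'] else ['1']) := by
  have hrep : List.replicate n '0' = List.replicate (n - 1) '0' ++ ['0'] := by
    conv_lhs => rw [show n = (n - 1) + 1 by omega]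
    exact List.replicate_succ'
  have hdigit : Nat.digitChar b = (if b = 0 then '0' else '1') := by
    interval_cases b <;> simp [Nat.digitChar]
  by_cases hk : k = 0
  · subst hk
    have h0 : PySem.Int.toBinChars ((0 : Nat) : Int) = ['0'] := by decide
    have hb' : PySem.Int.toBinChars ((2 * 0 + b : Nat) : Int) = [if b = 0 then '0' else '1'] := by
      interval_cases b <;> decide
    unfold pvW
    rw [hb', h0, pvZfill_singleton _ (by split <;> decide) (n + 1) (by omega),
      pvZfill_singleton '0' (by decide) n hn]
    push_cast
    rw [hrep]
    split <;> simp [pvSubst, List.flatMap_append]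
  · have hk1 : 1 ≤ k := by omega
    unfold pvW
    rw [pvToBinChars_natCast, pvToBinChars_natCast,
      show ((2 * k + b : Nat)) = 2 * k + b from rfl,
      pvToDigits_step k b hk1 hb]
    push_cast
    rw [pvZfill_append _ _ n (pvToDigits_ne_nil k) (pvToDigits_chars k)]
    rw [List.flatMap_append, hdigit]
    split <;> simp [pvSubst]

theorem pvA_level (n : Nat) (hn : 1 ≤ n) :
    (List.range (2 ^ n)).map (fun k => pvW k n) = pvLvl [] n := by
  obtain ⟨m, rfl⟩ : ∃ m, n = m + 1 := ⟨n - 1, by omega⟩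
  clear hn
  induction m with
  | zero => decide
  | succ m ih =>
    have hpow : 2 ^ (m + 1 + 1) = 2 * 2 ^ (m + 1) := by ring
    rw [hpow, pvRange_two_mul, List.map_flatMap]
    have : ∀ k ∈ List.range (2 ^ (m + 1)),
        (List.map (fun k => pvW k (m + 1 + 1)) [2 * k, 2 * k + 1] : List (List Char))
          = [pvW k (m + 1) ++ ['-', '1'], pvW k (m + 1) ++ ['1']] := by
      intro k _
      simp only [List.map_cons, List.map_nil]
      have h0 := pvW_step k (m + 1) (by omega) 0 (by omega)
      have h1 := pvW_step k (m + 1) (by omega) 1 (by omega)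
      rw [Nat.add_zero] at h0
      rw [h0, h1]
      simp
    calc (List.range (2 ^ (m + 1))).flatMap
          (fun k => List.map (fun k => pvW k (m + 1 + 1)) [2 * k, 2 * k + 1])
        = (List.range (2 ^ (m + 1))).flatMap
            (fun k => [pvW k (m + 1) ++ ['-', '1'], pvW k (m + 1) ++ ['1']]) := by
          rw [List.flatMap_congr this]
      _ = ((List.range (2 ^ (m + 1))).map (fun k => pvW k (m + 1))).flatMap
            (fun t => [t ++ ['-', '1'], t ++ ['1']]) := by
          rw [List.flatMap_map]
      _ = pvLvl [] (m + 1 + 1) := by rw [ih]; rfl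

-- the canonical breadth-first node list
def pvNodes (M : Nat) : List (List Char) :=
  (List.range M).flatMap (fun j => pvLvl [] (j + 1))

-- the DFS list of B is a permutation of the breadth-first list ---------------

theorem pvLvl_split (n : Nat) : ∀ s : List Char,
    pvLvl s (n + 1) = pvLvl (s ++ ['-', '1']) n ++ pvLvl (s ++ ['1']) n := by
  induction n with
  | zero => intro s; rfl
  | succ n ih =>
    intro s
    show (pvLvl s (n + 1)).flatMap _ = _
    rw [ih s, List.flatMap_append]
    rfl

theorem pvFlatMap_append_perm {α β : Type} (l : List α) (f g : α → List β) :
    (l.flatMap (fun x => f x ++ g x)).Perm (l.flatMap f ++ l.flatMap g) := by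
  induction l with
  | nil => simp
  | cons x t ih =>
    simp only [List.flatMap_cons]
    refine (List.Perm.append_left (f x ++ g x) ih).trans ?_
    have h := List.perm_append_comm_assoc (g x) (t.flatMap f) (t.flatMap g)
    have h2 := List.Perm.append_left (f x) h
    simpa [List.append_assoc] using h2

theorem pvDfsB_perm (r : Nat) : ∀ s : List Char,
    (pvDfsB s r).Perm ((List.range r).flatMap (fun j => pvLvl s (j + 1))) := by
  induction r with
  | zero => intro s; simp [pvDfsB]
  | succ r ih =>
    intro s
    have hrange : (List.range (r + 1)).flatMap (fun j => pvLvl s (j + 1))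
        = pvLvl s 1 ++ (List.range r).flatMap (fun j => pvLvl s (j + 1 + 1)) := by
      rw [List.range_succ_eq_map]
      simp [List.flatMap_map]
    have hsplit : (List.range r).flatMap (fun j => pvLvl s (j + 1 + 1))
        = (List.range r).flatMap
            (fun j => pvLvl (s ++ ['-', '1']) (j + 1) ++ pvLvl (s ++ ['1']) (j + 1)) := by
      apply List.flatMap_congr
      intro j _
      exact pvLvl_split (j + 1) s
    have hlvl1 : pvLvl s 1 = [s ++ ['-', '1'], s ++ ['1']] := by simp [pvLvl]
    rw [hrange, hsplit, hlvl1]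
    have h1 : (pvDfsB (s ++ ['-', '1']) r ++ (s ++ ['1']) :: pvDfsB (s ++ ['1']) r).Perm
        ((s ++ ['1']) :: (pvDfsB (s ++ ['-', '1']) r ++ pvDfsB (s ++ ['1']) r)) :=
      List.perm_middle
    have h2 : (pvDfsB (s ++ ['-', '1']) r ++ pvDfsB (s ++ ['1']) r).Perm
        ((List.range r).flatMap
          (fun j => pvLvl (s ++ ['-', '1']) (j + 1) ++ pvLvl (s ++ ['1']) (j + 1))) :=
      ((ih (s ++ ['-', '1'])).append (ih (s ++ ['1']))).trans
        (pvFlatMap_append_perm (List.range r) _ _).symm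
    show ((s ++ ['-', '1']) :: (pvDfsB (s ++ ['-', '1']) r ++ (s ++ ['1']) :: pvDfsB (s ++ ['1']) r)).Perm _
    exact List.Perm.cons _ (h1.trans (List.Perm.cons _ h2))

-- the A-side tail equals the breadth-first list ------------------------------

theorem pvA_tail (M : Int) :
    (PySem.List.pyRange 1 (M + 1) 1).flatMap (fun depth =>
        (PySem.List.pyRange 0 (2 ^ depth.toNat) 1).map (fun i =>
          PySem.Chars.replace (PySem.Chars.zfill (PySem.Int.toBinChars i) depth) ['0'] ['-', '1']))
      = pvNodes M.toNat := by
  rw [PySem.List.pyRange_one 1 (M + 1), List.flatMap_map]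
  have hM : (M + 1 - 1).toNat = M.toNat := by omega
  rw [hM]
  unfold pvNodes
  apply List.flatMap_congr
  intro j hj
  have hdepth : ((1 : Int) + (j : Int)).toNat = j + 1 := by omega
  have hcast : (1 : Int) + (j : Int) = ((j + 1 : Nat) : Int) := by push_cast; ring
  rw [hdepth]
  rw [PySem.List.pyRange_one 0 (2 ^ (j + 1))]
  have hpow : ((2 : Int) ^ (j + 1) - 0).toNat = 2 ^ (j + 1) := by
    rw [sub_zero, show ((2 : Int) ^ (j + 1)) = ((2 ^ (j + 1) : Nat) : Int) by push_cast; ring,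
      Int.toNat_natCast]
  rw [hpow, List.map_map]
  rw [← pvA_level (j + 1) (by omega)]
  apply List.map_congr_left
  intro k _
  show PySem.Chars.replace (PySem.Chars.zfill (PySem.Int.toBinChars (0 + (k : Int))) ((1 : Int) + (j : Int))) ['0'] ['-', '1'] = pvW k (j + 1)
  rw [zero_add, hcast, pvReplace_eq]
  rfl

-- the shared final phase respects set-equality of the encoding lists --------

def pvFinish (enc : List String) : List (String × Int) :=
  ((PySem.List.sorted (PySem.Set.ofList enc) (fun x => x) false).zipIdx.foldl
    (fun d p => d.insert p.1 ((p.2 : Int))) PySem.Dict.empty).items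

theorem pvFinish_congr (e₁ e₂ : List String) (h : ∀ x, x ∈ e₁ ↔ x ∈ e₂) :
    pvFinish e₁ = pvFinish e₂ := by
  unfold pvFinish
  have hperm : (PySem.Set.ofList e₁).Perm (PySem.Set.ofList e₂) := by
    rw [List.perm_ext_iff_of_nodup (PySem.Set.nodup_ofList _) (PySem.Set.nodup_ofList _)]
    intro a
    rw [PySem.Set.mem_ofList, PySem.Set.mem_ofList]
    exact h a
  rw [PySem.List.sorted_eq_sorted_of_perm _ _ _ (fun a b hab => hab) hperm]

theorem pvSet_zero {α : Type} (x v : α) (l : List α) :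
    PySem.List.pySetD (x :: l) 0 v = v :: l := by
  rw [show (0 : Int) = ((0 : Nat) : Int) from rfl, PySem.List.pySetD_natCast]
  rfl

-- ===== VERDICT (by name: the statement is the Claim_ definition above) =====
theorem get_positional_mapping_spec : Claim_equal_get_positional_mapping := by
  intro M _
  unfold Spec_get_positional_mapping get_positional_mapping get_positional_mapping_alt
  simp only [PySem.List.foldl_append_singleton_eq_map]
  rw [PySem.List.foldl_append_eq_flatMap]
  simp only [List.singleton_append, List.map_cons, List.map_flatMap, List.map_map,
    Function.comp_def]
  rw [pvA_tail M, pvSet_zero, PySem.List.slice_from_one, List.tail_cons]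
  show pvFinish _ = pvFinish _
  apply pvFinish_congr
  intro x
  simp only [List.mem_cons, List.mem_flatMap, List.mem_map]
  constructor
  · rintro (rfl | ⟨p, hp, s, hs, rfl⟩)
    · left; rfl
    · right
      exact ⟨p, (pvDfsB_perm M.toNat []).mem_iff.mpr hp, s,
        (pvDfsB_perm M.toNat []).mem_iff.mpr hs, rfl⟩
  · rintro (rfl | ⟨p, hp, s, hs, rfl⟩)
    · left; rfl
    · right
      exact ⟨p, (pvDfsB_perm M.toNat []).mem_iff.mp hp, s,
        (pvDfsB_perm M.toNat []).mem_iff.mp hs, rfl⟩
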